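-- pv_equiv track=rewrite | github.com/yhsol/Algorithm_python | Algorithm/calc.py | find
-- ===== SOURCE A (Python) =====
-- def find(a, n):
--     if n <= 1:
--         return a[0]
--     s_n_1 = find(a, n-1)
--     if s_n_1 > a[n-1]:
--         return s_n_1
--     else:
--         return a[n-1]
-- ===== SOURCE B (Python) =====
-- def find(a, n):
--     best = a[0]
--     for i in range(1, n):
--         if a[i] > best:
--             best = a[i]
--     return best
-- ===== Notes on version B (the rewrite author's own statement) =====
-- stated objective: alternative
-- what changed: Replaces A's recursion on n (depth-n call stack) with a single iterative scan keeping a running best, seeded with a[0].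
import Mathlib
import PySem

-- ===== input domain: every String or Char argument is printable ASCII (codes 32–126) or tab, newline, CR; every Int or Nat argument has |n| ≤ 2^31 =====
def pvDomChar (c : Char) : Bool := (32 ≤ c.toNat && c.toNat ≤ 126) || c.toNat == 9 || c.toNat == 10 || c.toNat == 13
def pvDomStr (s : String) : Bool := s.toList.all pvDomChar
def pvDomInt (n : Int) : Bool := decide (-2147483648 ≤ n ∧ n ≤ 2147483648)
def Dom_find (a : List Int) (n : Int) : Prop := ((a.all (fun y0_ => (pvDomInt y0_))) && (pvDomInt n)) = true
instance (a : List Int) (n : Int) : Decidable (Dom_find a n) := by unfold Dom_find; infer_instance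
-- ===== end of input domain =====

-- B: iterative running-max scan instead of A's depth-n recursion; same return value on Pre_.
-- ===== PORT A =====
def find (a : List Int) (n : Int) : Int :=
  if _h : n ≤ 1 then (PySem.List.pyGet? a 0).getD 0
  else
    let s_n_1 := find a (n - 1)
    let an := (PySem.List.pyGet? a (n - 1)).getD 0
    if s_n_1 > an then s_n_1 else an
termination_by n.toNat
decreasing_by omega

-- ===== PORT B =====
def find_alt (a : List Int) (n : Int) : Int :=
  (PySem.List.pyRange 1 n 1).foldl
    (fun best i =>
      let ai := (PySem.List.pyGet? a i).getD 0
      if ai > best then ai else best)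
    ((PySem.List.pyGet? a 0).getD 0)

-- ===== PRECONDITION & SPEC =====
-- Pre_ excludes exactly the inputs where the Python A raises IndexError: empty a (a[0]) or n > len(a) (a[n-1]).
def Pre_find (a : List Int) (n : Int) : Prop := a ≠ [] ∧ n ≤ (a.length : Int)
instance (a : List Int) (n : Int) : Decidable (Pre_find a n) := by unfold Pre_find; infer_instance
def pvWitness_find : List Int × Int := ([3, 1, 4], 3)
def Spec_find (a : List Int) (n : Int) (out : Int) : Prop := out = find_alt a n
instance (a : List Int) (n : Int) (out : Int) : Decidable (Spec_find a n out) := by unfold Spec_find; infer_instance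

-- ===== CLAIM (what is proved, stated in full; the proofs are below) =====
def Claim_equal_find : Prop := ∀ (a : List Int) (n : Int), Dom_find a n → Pre_find a n → Spec_find a n (find a n)

-- ===== LEMMAS AND PROOFS =====

-- ===== VERDICT (by name: the statement is the Claim_ definition above) =====
-- A = B for ALL inputs of the ports (the defaults coincide), proved by induction on n.toNat.
theorem find_eq_alt (a : List Int) (n : Int) : find a n = find_alt a n := by
  by_cases h : n ≤ 1
  · rw [find, find_alt, dif_pos h, PySem.List.pyRange_one_eq_nil (by omega)]
    rfl
  · have ih := find_eq_alt a (n - 1)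
    have hsplit : PySem.List.pyRange 1 n 1 = PySem.List.pyRange 1 (n - 1) 1 ++ [n - 1] := by
      have h2 := PySem.List.pyRange_one_succ_right (a := 1) (b := n - 1) (by omega)
      simpa [show n - 1 + 1 = n by ring] using h2
    rw [find, find_alt, dif_neg h, hsplit]
    simp only [List.foldl_append, List.foldl_cons, List.foldl_nil]
    rw [ih, find_alt]
    dsimp only
    omega
termination_by n.toNat
decreasing_by omega

theorem find_spec : Claim_equal_find := by
  intro a n _ _
  unfold Spec_find
  exact find_eq_alt a n
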